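-- pv_equiv track=rewrite | github.com/razvanmelecciu/AES128 | AES128.py | transpose_linear_array
-- ===== SOURCE A (Python) =====
-- def transpose_linear_array(matrix_array, nb_lines, nb_cols):
--     transposed_array = []
--     i = 0
--     j = 0
--     k = 0
--     matrix_nb_elems = nb_lines * nb_cols
--     while j < matrix_nb_elems:
--         if i >= matrix_nb_elems:
--             k = k + 1
--             i = k
--         j += 1
--         transposed_array.append(matrix_array[i])
--         i += nb_cols
--     return transposed_array
-- ===== SOURCE B (Python) =====
-- def transpose_linear_array(matrix_array, nb_lines, nb_cols):
--     if nb_lines <= 0 or nb_cols <= 0: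
--         return []
--     rows = [[matrix_array[r * nb_cols + c] for c in range(nb_cols)]
--             for r in range(nb_lines)]
--     return [x for col in zip(*rows) for x in col]
-- ===== Notes on version B (the rewrite author's own statement) =====
-- stated objective: idiomatic
-- what changed: A walks the flat array with a single while loop maintaining a stride index that is manually reset per column; B reshapes the flat array into a 2-D list of rows, transposes it with zip(*rows) and flattens the columns.
-- intended difference: When both nb_lines and nb_cols are negative (and the array is long enough that A's negative indices wrap around instead of raising), A returns a nonsense list assembled via negative-index wraparound, e.g. A([1..10],-1,-2) = [1, 9]; B returns [] as for any other non-positive dimension, which is the intended value for meaningless negative dimensions. — e.g. on transpose_linear_array([5], -1, -1): A returns [5], B returns []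
import Mathlib
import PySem

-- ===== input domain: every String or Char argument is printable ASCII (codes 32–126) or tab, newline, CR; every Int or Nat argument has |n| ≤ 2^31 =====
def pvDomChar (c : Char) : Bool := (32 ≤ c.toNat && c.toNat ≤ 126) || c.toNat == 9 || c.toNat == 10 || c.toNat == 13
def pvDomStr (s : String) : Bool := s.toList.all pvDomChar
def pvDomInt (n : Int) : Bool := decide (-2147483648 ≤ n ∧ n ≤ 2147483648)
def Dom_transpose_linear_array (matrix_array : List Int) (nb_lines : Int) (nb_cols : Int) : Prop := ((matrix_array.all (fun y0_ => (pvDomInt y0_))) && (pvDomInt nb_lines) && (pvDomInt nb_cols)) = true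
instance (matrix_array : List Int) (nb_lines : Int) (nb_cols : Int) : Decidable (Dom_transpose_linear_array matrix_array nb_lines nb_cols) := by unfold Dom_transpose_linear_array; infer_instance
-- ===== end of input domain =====

-- B reshapes the flat array into rows and transposes with zip(*rows); A walks the flat
-- array with one while loop and a manually reset stride index (objective: idiomatic).

-- ===== PORT A =====
-- the while loop of A: fuel = number of remaining iterations (j counts them in Python);
-- matrix_array[i] is pyGet? with default 0 — Pre_ excludes the inputs where Python raises IndexError
def tlaLoop (ma : List Int) (elems cols : Int) : Nat → Int → Int → List Int → List Int
  | 0, _, _, acc => acc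
  | fuel+1, i, k, acc =>
    let k' := if elems ≤ i then k + 1 else k
    let i' := if elems ≤ i then k' else i
    tlaLoop ma elems cols fuel (i' + cols) k' (acc ++ [(PySem.List.pyGet? ma i').getD 0])

def transpose_linear_array (matrix_array : List Int) (nb_lines : Int) (nb_cols : Int) : List Int :=
  tlaLoop matrix_array (nb_lines * nb_cols) nb_cols (nb_lines * nb_cols).toNat 0 0 []

-- ===== PORT B =====
-- hand port of Python's zip(*rows) on a list of lists (exact: emits while every row is
-- nonempty, so it stops at the shortest row, and zip of no rows is []); the fuel
-- (length of the first row, 0 if there is none) bounds the iteration count.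
def tlaZipF : Nat → List (List Int) → List (List Int)
  | 0, _ => []
  | fuel+1, rows =>
    if rows.isEmpty || rows.any (fun r => r.isEmpty) then []
    else (rows.map (fun r => r.headI)) :: tlaZipF fuel (rows.map (fun r => r.tail))

def tlaZip (rows : List (List Int)) : List (List Int) := tlaZipF rows.headI.length rows

def transpose_linear_array_alt (matrix_array : List Int) (nb_lines : Int) (nb_cols : Int) : List Int :=
  if nb_lines ≤ 0 ∨ nb_cols ≤ 0 then []
  else
    let rows := (PySem.List.pyRange 0 nb_lines 1).map (fun r =>
      (PySem.List.pyRange 0 nb_cols 1).map (fun c => (PySem.List.pyGet? matrix_array (r * nb_cols + c)).getD 0))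
    ((tlaZip rows).map (fun col => col)).flatten

-- ===== PRECONDITION & SPEC =====
-- Pre_ excludes exactly the inputs on which A raises IndexError: with non-negative
-- dimensions A needs nb_lines*nb_cols elements; with both dimensions negative A's index
-- walks 0, nb_cols, 2*nb_cols, … downward and survives (by negative-index wraparound)
-- iff the array is nonempty and the last index (nb_lines*nb_cols-1)*nb_cols is ≥ -len.
def Pre_transpose_linear_array (matrix_array : List Int) (nb_lines : Int) (nb_cols : Int) : Prop :=
  (¬(nb_lines < 0 ∧ nb_cols < 0) ∧ nb_lines * nb_cols ≤ (matrix_array.length : Int)) ∨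
  (nb_lines < 0 ∧ nb_cols < 0 ∧ 1 ≤ (matrix_array.length : Int) ∧
    -(matrix_array.length : Int) ≤ (nb_lines * nb_cols - 1) * nb_cols)
instance (matrix_array : List Int) (nb_lines : Int) (nb_cols : Int) : Decidable (Pre_transpose_linear_array matrix_array nb_lines nb_cols) := by unfold Pre_transpose_linear_array; infer_instance

def pvWitness_transpose_linear_array : List Int × Int × Int := ([1, 2, 3, 4, 5, 6], 2, 3)

-- When both nb_lines and nb_cols are negative (and A survives), A returns a list glued
-- together by negative-index wraparound, e.g. A([5],-1,-1)=[5]; B returns [] as for any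
-- other non-positive dimension, the intended value for meaningless negative dimensions.
def D_transpose_linear_array (matrix_array : List Int) (nb_lines : Int) (nb_cols : Int) : Prop :=
  nb_lines < 0 ∧ nb_cols < 0
instance (matrix_array : List Int) (nb_lines : Int) (nb_cols : Int) : Decidable (D_transpose_linear_array matrix_array nb_lines nb_cols) := by unfold D_transpose_linear_array; infer_instance

def Spec_transpose_linear_array (matrix_array : List Int) (nb_lines : Int) (nb_cols : Int) (out : List Int) : Prop := ¬ D_transpose_linear_array matrix_array nb_lines nb_cols → out = transpose_linear_array_alt matrix_array nb_lines nb_cols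
instance (matrix_array : List Int) (nb_lines : Int) (nb_cols : Int) (out : List Int) : Decidable (Spec_transpose_linear_array matrix_array nb_lines nb_cols out) := by unfold Spec_transpose_linear_array; infer_instance

def pvDiffWitness_transpose_linear_array : List Int × Int × Int := ([5], -1, -1)
def pvDiffWitnessOut_transpose_linear_array : (List Int) × (List Int) := ([5], [])

-- ===== CLAIM (what is proved, stated in full; the proofs are below) =====
def Claim_unchanged_transpose_linear_array : Prop := ∀ (matrix_array : List Int) (nb_lines : Int) (nb_cols : Int), Dom_transpose_linear_array matrix_array nb_lines nb_cols → Pre_transpose_linear_array matrix_array nb_lines nb_cols → Spec_transpose_linear_array matrix_array nb_lines nb_cols (transpose_linear_array matrix_array nb_lines nb_cols)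
def Claim_changed_transpose_linear_array : Prop := Dom_transpose_linear_array (pvDiffWitness_transpose_linear_array.1) (pvDiffWitness_transpose_linear_array.2.1) (pvDiffWitness_transpose_linear_array.2.2) ∧ Pre_transpose_linear_array (pvDiffWitness_transpose_linear_array.1) (pvDiffWitness_transpose_linear_array.2.1) (pvDiffWitness_transpose_linear_array.2.2) ∧ D_transpose_linear_array (pvDiffWitness_transpose_linear_array.1) (pvDiffWitness_transpose_linear_array.2.1) (pvDiffWitness_transpose_linear_array.2.2) ∧ transpose_linear_array (pvDiffWitness_transpose_linear_array.1) (pvDiffWitness_transpose_linear_array.2.1) (pvDiffWitness_transpose_linear_array.2.2) = pvDiffWitnessOut_transpose_linear_array.1 ∧ transpose_linear_array_alt (pvDiffWitness_transpose_linear_array.1) (pvDiffWitness_transpose_linear_array.2.1) (pvDiffWitness_transpose_linear_array.2.2) = pvDiffWitnessOut_transpose_linear_array.2 ∧ pvDiffWitnessOut_transpose_linear_array.1 ≠ pvDiffWitnessOut_transpose_linear_array.2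
def Claim_exact_transpose_linear_array : Prop := ∀ (matrix_array : List Int) (nb_lines : Int) (nb_cols : Int), Dom_transpose_linear_array matrix_array nb_lines nb_cols → Pre_transpose_linear_array matrix_array nb_lines nb_cols → D_transpose_linear_array matrix_array nb_lines nb_cols → transpose_linear_array matrix_array nb_lines nb_cols ≠ transpose_linear_array_alt matrix_array nb_lines nb_cols

-- ===== LEMMAS AND PROOFS =====

-- the index sequence A's loop visits
def tlaIdx (elems cols : Int) : Nat → Int → Int → List Int
  | 0, _, _ => []
  | fuel+1, i, k =>
    let k' := if elems ≤ i then k + 1 else k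
    let i' := if elems ≤ i then k' else i
    i' :: tlaIdx elems cols fuel (i' + cols) k'

lemma tlaLoop_eq_append (ma : List Int) (elems cols : Int) :
    ∀ (fuel : Nat) (i k : Int) (acc : List Int),
    tlaLoop ma elems cols fuel i k acc
      = acc ++ (tlaIdx elems cols fuel i k).map (fun j => (PySem.List.pyGet? ma j).getD 0) := by
  intro fuel
  induction fuel with
  | zero => intro i k acc; simp [tlaLoop, tlaIdx]
  | succ f ih => intro i k acc; simp [tlaLoop, tlaIdx, ih]

lemma tlaIdx_length (elems cols : Int) :
    ∀ (fuel : Nat) (i k : Int), (tlaIdx elems cols fuel i k).length = fuel := by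
  intro fuel
  induction fuel with
  | zero => intro i k; simp [tlaIdx]
  | succ f ih => intro i k; simp [tlaIdx, ih]

lemma tlaIdx_no_reset (elems cols : Int) :
    ∀ (n : Nat) (f : Nat) (i k : Int), (∀ j : Nat, j < n → i + (j : Int) * cols < elems) →
    tlaIdx elems cols (n + f) i k
      = (List.range n).map (fun (j : Nat) => i + (j : Int) * cols)
          ++ tlaIdx elems cols f (i + (n : Int) * cols) k := by
  intro n
  induction n with
  | zero => intro f i k _; simp
  | succ m ih =>
    intro f i k h
    have h0 : ¬ elems ≤ i := by
      have := h 0 (by omega); push_cast at this; omega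
    have hstep : m + 1 + f = (m + f) + 1 := by omega
    rw [hstep]
    simp only [tlaIdx, if_neg h0]
    rw [ih f (i + cols) k (by
      intro j hj
      have := h (j + 1) (by omega)
      push_cast at this ⊢
      linarith [this])]
    rw [List.range_succ_eq_map]
    simp only [List.map_cons, List.map_map, List.cons_append]
    congr 2
    · push_cast; ring
    · apply List.map_congr_left; intro j _; simp [Function.comp]; push_cast; ring
    · push_cast; ring

lemma tlaIdx_reset (elems cols : Int) (f : Nat) (i k : Int) (h : elems ≤ i) :
    tlaIdx elems cols (f + 1) i k = (k + 1) :: tlaIdx elems cols f (k + 1 + cols) (k + 1) := by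
  simp [tlaIdx, if_pos h]

-- after finishing column c (state i = c + L*C, k = c), the remaining d*L steps emit columns c+1 … c+d
lemma tlaIdx_tail (L C : Nat) (hL : 0 < L) :
    ∀ (d c : Nat), c + d + 1 = C →
    tlaIdx ((L : Int) * (C : Int)) (C : Int) (d * L) ((c : Int) + (L : Int) * (C : Int)) (c : Int)
      = ((List.range d).map (fun (t : Nat) => (List.range L).map
          (fun (r : Nat) => ((c : Int) + 1 + (t : Int) + (r : Int) * (C : Int))))).flatten := by
  intro d
  induction d with
  | zero => intro c _; simp [tlaIdx]
  | succ e ih =>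
    intro c hc
    have hfuel : (e + 1) * L = ((L - 1) + e * L) + 1 := by
      cases L with
      | zero => omega
      | succ m => simp; ring
    rw [hfuel]
    rw [tlaIdx_reset _ _ _ _ _ (by linarith [Int.natCast_nonneg c])]
    rw [tlaIdx_no_reset _ _ (L - 1) (e * L) _ _ (by
      intro j hj
      have hj' : (j : Int) + 1 ≤ (L : Int) - 1 := by
        have : (j : Int) < ((L - 1 : Nat) : Int) := by exact_mod_cast hj
        omega
      have hc1 : (c : Int) + 1 + 1 ≤ (C : Int) := by
        have h3 : c + 1 + 1 ≤ C := by omega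
        exact_mod_cast h3
      have hCpos : (0 : Int) < (C : Int) := by exact_mod_cast (show 0 < C by omega)
      have h1 : ((j : Int) + 1) * (C : Int) ≤ ((L : Int) - 1) * (C : Int) :=
        mul_le_mul_of_nonneg_right hj' (by positivity)
      nlinarith)]
    have hstate : (c : Int) + 1 + (C : Int) + ((L - 1 : Nat) : Int) * (C : Int)
        = ((c + 1 : Nat) : Int) + (L : Int) * (C : Int) := by
      have : ((L - 1 : Nat) : Int) = (L : Int) - 1 := by omega
      rw [this]; push_cast; ring
    rw [hstate]
    rw [show ((c : Int) + 1) = ((c + 1 : Nat) : Int) from by push_cast; ring]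
    rw [ih (c + 1) (by omega)]
    -- combine the reset emission and the L-1 straight emissions into column c+1
    rw [← List.cons_append]
    conv_rhs => rw [List.range_succ_eq_map]
    simp only [List.map_cons, List.flatten_cons, List.map_map]
    congr 1
    · -- the emitted column c+1
      have hLr : List.range L = List.range ((L - 1) + 1) := by rw [Nat.sub_add_cancel hL]
      rw [hLr, List.range_succ_eq_map]
      simp only [List.map_cons, List.map_map]
      congr 1
      · push_cast; ring
      · apply List.map_congr_left; intro j _
        (try simp only [Function.comp_apply]); push_cast [Nat.succ_eq_add_one]; ring
    · congr 1
      apply List.map_congr_left; intro t _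
      apply List.map_congr_left; intro r _
      (try simp only [Function.comp_apply]); push_cast [Nat.succ_eq_add_one]; ring

-- the whole index sequence, column-major
lemma tlaIdx_full (L C : Nat) (hL : 0 < L) (hC : 0 < C) :
    tlaIdx ((L : Int) * (C : Int)) (C : Int) (L * C) 0 0
      = ((List.range C).map (fun (c : Nat) => (List.range L).map
          (fun (r : Nat) => ((c : Int) + (r : Int) * (C : Int))))).flatten := by
  have key := tlaIdx_no_reset ((L : Int) * (C : Int)) (C : Int) L ((C - 1) * L) 0 0 (by
    intro j hj
    have hj' : (j : Int) + 1 ≤ (L : Int) := by exact_mod_cast hj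
    have hCpos : (0 : Int) < (C : Int) := by exact_mod_cast hC
    have h1 : ((j : Int) + 1) * (C : Int) ≤ (L : Int) * (C : Int) :=
      mul_le_mul_of_nonneg_right hj' (by positivity)
    nlinarith)
  have hf2 : L + (C - 1) * L = L * C := by
    cases C with
    | zero => omega
    | succ m => simp; ring
  rw [hf2] at key
  rw [key]
  have tail := tlaIdx_tail L C hL (C - 1) 0 (by omega)
  simp only [Nat.cast_zero, zero_add] at tail
  simp only [zero_add]
  rw [tail]
  have hCr : List.range C = List.range ((C - 1) + 1) := by rw [Nat.sub_add_cancel hC]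
  conv_rhs => rw [hCr, List.range_succ_eq_map]
  simp only [List.map_cons, List.flatten_cons, List.map_map]
  congr 1
  · apply List.map_congr_left; intro j _; push_cast; ring
  · congr 1
    apply List.map_congr_left; intro t _
    apply List.map_congr_left; intro r _
    (try simp only [Function.comp_apply]); push_cast [Nat.succ_eq_add_one]; ring

-- zip(*rows) on a rectangular L×C block of rows is the list of C columns
lemma tlaZipF_rect (C : Nat) : ∀ (g : Nat → Nat → Int) (L : Nat), 0 < L →
    tlaZipF C ((List.range L).map (fun (r : Nat) => (List.range C).map (g r)))
      = (List.range C).map (fun (c : Nat) => (List.range L).map (fun (r : Nat) => g r c)) := by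
  induction C with
  | zero => intro g L hL; simp [tlaZipF]
  | succ m ih =>
    intro g L hL
    rw [tlaZipF]
    have h1 : ((List.range L).map (fun (r : Nat) => (List.range (m + 1)).map (g r))).isEmpty = false := by
      simp [List.range_eq_nil]
      omega
    have h2 : ((List.range L).map (fun (r : Nat) => (List.range (m + 1)).map (g r))).any
        (fun r => r.isEmpty) = false := by
      simp only [List.any_eq_false]
      intro r hr
      rcases List.mem_map.mp hr with ⟨a, -, rfl⟩
      simp [List.isEmpty_iff, List.range_eq_nil]
    rw [if_neg (by simp [h1, h2])]
    simp only [List.map_map]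
    have hhead : ((List.range L).map ((fun (r : List Int) => r.headI)
          ∘ fun (r : Nat) => (List.range (m + 1)).map (g r)))
        = (List.range L).map (fun (r : Nat) => g r 0) := by
      apply List.map_congr_left; intro r _
      simp [Function.comp, List.range_succ_eq_map]
    have htail : ((List.range L).map ((fun (r : List Int) => r.tail)
          ∘ fun (r : Nat) => (List.range (m + 1)).map (g r)))
        = (List.range L).map (fun (r : Nat) => (List.range m).map (fun (c : Nat) => g r (c + 1))) := by
      apply List.map_congr_left; intro r _
      simp [Function.comp, List.range_succ_eq_map, List.map_map]
    rw [hhead, htail, ih (fun r c => g r (c + 1)) L hL]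
    rw [List.range_succ_eq_map]
    simp [List.map_map, Function.comp]

-- B as a double map over List.range, in the non-negative case
lemma alt_eq_cols (ma : List Int) (L C : Nat) (hL : 0 < L) (hC : 0 < C) :
    transpose_linear_array_alt ma (L : Int) (C : Int)
      = (tlaZip ((List.range L).map (fun (r : Nat) => (List.range C).map
          (fun (c : Nat) => (PySem.List.pyGet? ma ((r : Int) * (C : Int) + (c : Int))).getD 0)))).flatten := by
  unfold transpose_linear_array_alt
  rw [if_neg (by push_neg; constructor <;> [exact_mod_cast hL; exact_mod_cast hC])]
  simp only [PySem.List.pyRange_zero_nat, List.map_map, List.map_id']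
  congr 2

-- A is [] when nb_lines*nb_cols ≤ 0
lemma a_nonpos (ma : List Int) (nl nc : Int) (h : nl * nc ≤ 0) :
    transpose_linear_array ma nl nc = [] := by
  unfold transpose_linear_array
  have : (nl * nc).toNat = 0 := by omega
  rw [this]
  simp [tlaLoop]

-- main positive-dimensions equality
lemma pos_case (ma : List Int) (L C : Nat) :
    transpose_linear_array ma (L : Int) (C : Int) = transpose_linear_array_alt ma (L : Int) (C : Int) := by
  by_cases hL : 0 < L
  · by_cases hC : 0 < C
    · -- both positive: full column-major comparison
      rw [alt_eq_cols ma L C hL hC]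
      unfold transpose_linear_array
      rw [tlaLoop_eq_append]
      simp only [List.nil_append]
      have hfuel : ((L : Int) * (C : Int)).toNat = L * C := by
        rw [← Nat.cast_mul, Int.toNat_natCast]
      rw [hfuel]
      rw [tlaIdx_full L C hL hC]
      have hrow0 : ((List.range L).map (fun (r : Nat) => (List.range C).map
          (fun (c : Nat) => (PySem.List.pyGet? ma ((r : Int) * (C : Int) + (c : Int))).getD 0))).headI.length
            = C := by
        cases hLr : List.range L with
        | nil => simp [List.range_eq_nil] at hLr; omega
        | cons a l => simp [hLr]
      unfold tlaZip
      rw [hrow0]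
      rw [tlaZipF_rect C
        (fun (r c : Nat) => (PySem.List.pyGet? ma ((r : Int) * (C : Int) + (c : Int))).getD 0) L hL]
      rw [List.map_flatten]
      simp only [List.map_map]
      congr 1
      apply List.map_congr_left; intro c _
      simp only [Function.comp, List.map_map]
      apply List.map_congr_left; intro r _
      simp only [Function.comp_apply]
      congr 2
      all_goals ring
    · -- C = 0: both sides empty
      have hC0 : C = 0 := by omega
      subst hC0
      simp only [Nat.cast_zero]
      rw [a_nonpos ma (L : Int) 0 (by simp)]
      unfold transpose_linear_array_alt
      rw [if_pos (Or.inr le_rfl)]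
  · -- L = 0: both sides empty
    have hL0 : L = 0 := by omega
    subst hL0
    simp only [Nat.cast_zero]
    rw [a_nonpos ma 0 (C : Int) (by simp)]
    unfold transpose_linear_array_alt
    rw [if_pos (Or.inl le_rfl)]

-- B is [] when either dimension is negative or zero
lemma alt_nonpos (ma : List Int) (nl nc : Int) (h : nl ≤ 0 ∨ nc ≤ 0) :
    transpose_linear_array_alt ma nl nc = [] := by
  unfold transpose_linear_array_alt
  rw [if_pos h]

-- ===== VERDICT (by name: the statement is the Claim_ definition above) =====
theorem transpose_linear_array_spec : Claim_unchanged_transpose_linear_array := by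
  intro ma nl nc _ hpre hD
  unfold D_transpose_linear_array at hD
  rcases hpre with ⟨_, _⟩ | ⟨h1, h2, _, _⟩
  · by_cases hnl : 0 ≤ nl
    · by_cases hnc : 0 ≤ nc
      · obtain ⟨L, hL⟩ : ∃ L : Nat, nl = (L : Int) := ⟨nl.toNat, by omega⟩
        obtain ⟨C, hC⟩ : ∃ C : Nat, nc = (C : Int) := ⟨nc.toNat, by omega⟩
        subst hL hC
        exact pos_case ma L C
      · rw [a_nonpos ma nl nc (by nlinarith), alt_nonpos ma nl nc (by omega)]
    · by_cases hnc : 0 ≤ nc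
      · rw [a_nonpos ma nl nc (by nlinarith), alt_nonpos ma nl nc (by omega)]
      · exact absurd ⟨by omega, by omega⟩ hD
  · exact absurd ⟨h1, h2⟩ hD

theorem transpose_linear_array_changed : Claim_changed_transpose_linear_array := by
  unfold Claim_changed_transpose_linear_array; decide

theorem transpose_linear_array_tight : Claim_exact_transpose_linear_array := by
  intro ma nl nc _ hpre hD
  unfold D_transpose_linear_array at hD
  obtain ⟨h1, h2⟩ := hD
  rw [alt_nonpos ma nl nc (by omega)]
  unfold transpose_linear_array
  rw [tlaLoop_eq_append]
  intro hcontra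
  have hlen := congrArg List.length hcontra
  simp [tlaIdx_length] at hlen
  have : 1 ≤ nl * nc := by nlinarith
  omega
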